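/- GENERATED by c/gen_decode.py: decode facts of the image, one per distinct instruction byte string. -/
import UserX.DecodeImage

#decode_all Toy.Dec
  "41bd00000000"  -- mov r13d,0x0
  "4883fb3f"  -- cmp rbx,0x3f
  "48c744240800131400"  -- mov QWORD PTR [rsp+0x8],0x141300
  "4c8d6c2420"  -- lea r13,[rsp+0x20]
  "83fb07"  -- cmp ebx,0x7
  "c7830000c000f1f1f1f1"  -- mov DWORD PTR [rbx+0xc00000],0xf1f1f1f1
  "e88db8ffff"  -- call 100d60
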